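-- pv_equiv track=rewrite | github.com/brorssontrade/quantlab | src/quantkit/data/eodhd_search.py | pick_symbol
-- ===== SOURCE A (Python) =====
-- from typing import Optional, List, Dict, Any
--
-- def pick_symbol(candidates: List[Dict[str, Any]], prefs: Optional[list[str]] = None) -> Optional[str]:
--     """
--     Välj "CODE.EXCHANGE" med enkel prioritering på exchange (t.ex. ['SE','STO','XSTO']).
--     Kandidater returneras normalt med fält som code, exchange, name, etc.
--     """
--     if not candidates:
--         return None
--     if prefs:
--         for p in prefs:
--             for c in candidates:
--                 code = c.get("code") or c.get("symbol")
--                 exch = c.get("exchangeShortName") or c.get("exchange")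
--                 if code and exch and (exch.upper() == p.upper()):
--                     return f"{code}.{exch}"
--     # fallback: första rimliga
--     c = candidates[0]
--     code = c.get("code") or c.get("symbol")
--     exch = c.get("exchangeShortName") or c.get("exchange")
--     if code and exch:
--         return f"{code}.{exch}"
--     return None
-- ===== SOURCE B (Python) =====
-- from typing import Optional, List, Dict, Any
--
--
-- def pick_symbol(candidates: List[Dict[str, Any]], prefs: Optional[list[str]] = None) -> Optional[str]:
--     if not candidates:
--         return None
--     if prefs:
--         # rank each valid candidate by its exchange's position in prefs and take the
--         # minimum rank, earliest candidate winning ties (no nested prefs x candidates scan)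
--         ups = [p.upper() for p in prefs]
--         best = None  # (rank, code, exch)
--         for c in candidates:
--             code = c.get("code") or c.get("symbol")
--             exch = c.get("exchangeShortName") or c.get("exchange")
--             if code and exch:
--                 u = exch.upper()
--                 if u in ups:
--                     r = ups.index(u)
--                     if best is None or r < best[0]:
--                         best = (r, code, exch)
--         if best is not None:
--             return f"{best[1]}.{best[2]}"
--     c = candidates[0]
--     code = c.get("code") or c.get("symbol")
--     exch = c.get("exchangeShortName") or c.get("exchange")
--     if code and exch:
--         return f"{code}.{exch}"
--     return None
-- ===== Notes on version B (the rewrite author's own statement) =====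
-- stated objective: alternative
-- what changed: A's prefs-outer/candidates-inner nested scan is replaced by a single fold over candidates that ranks each valid candidate by its exchange's position in the upper-cased prefs list and keeps the minimum rank (earliest candidate wins ties); the empty guard and candidates[0] fallback are kept.
import Mathlib
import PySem

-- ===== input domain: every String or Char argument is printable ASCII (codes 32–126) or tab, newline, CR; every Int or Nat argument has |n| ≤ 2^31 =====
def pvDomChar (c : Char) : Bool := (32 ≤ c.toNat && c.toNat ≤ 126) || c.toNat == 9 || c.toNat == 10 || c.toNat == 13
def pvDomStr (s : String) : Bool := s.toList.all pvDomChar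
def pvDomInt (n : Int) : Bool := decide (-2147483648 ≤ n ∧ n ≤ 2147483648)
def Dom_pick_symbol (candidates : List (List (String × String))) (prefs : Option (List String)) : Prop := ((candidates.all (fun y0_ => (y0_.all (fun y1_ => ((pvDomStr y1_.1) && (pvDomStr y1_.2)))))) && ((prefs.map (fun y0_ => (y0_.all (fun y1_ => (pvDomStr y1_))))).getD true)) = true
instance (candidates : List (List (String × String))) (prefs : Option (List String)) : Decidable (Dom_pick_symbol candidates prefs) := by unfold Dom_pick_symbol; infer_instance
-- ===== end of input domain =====

-- B replaces A's prefs×candidates nested scan by one fold over candidates that keeps the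
-- candidate of minimum preference rank (earliest candidate wins ties); objective: alternative
-- decomposition, return value proved equal on all inputs.

-- ===== PORT A =====
-- `a or b` on results of dict.get (None and "" are falsy)
def pvOrA (a b : Option String) : Option String :=
  match a with
  | some s => if s = "" then b else some s
  | none => b

-- code = c.get("code") or c.get("symbol")   (dict.get = first match in the assoc list)
def pvCodeA (c : List (String × String)) : Option String :=
  pvOrA (c.lookup "code") (c.lookup "symbol")

-- exch = c.get("exchangeShortName") or c.get("exchange")
def pvExchA (c : List (String × String)) : Option String :=
  pvOrA (c.lookup "exchangeShortName") (c.lookup "exchange")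

-- f"{code}.{exch}"  (exact: concatenation on the char-list side)
def pvFmtA (code exch : String) : String :=
  String.ofList (code.toList ++ '.' :: exch.toList)

-- inner loop: for c in candidates
def pvInnerA (p : String) : List (List (String × String)) → Option String
  | [] => none
  | c :: rest =>
      match pvCodeA c, pvExchA c with
      | some cd, some ex =>
          if cd ≠ "" ∧ ex ≠ "" ∧ PySem.Str.upper ex = PySem.Str.upper p
          then some (pvFmtA cd ex)
          else pvInnerA p rest
      | _, _ => pvInnerA p rest

-- outer loop: for p in prefs
def pvOuterA (cs : List (List (String × String))) : List String → Option String
  | [] => none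
  | p :: ps =>
      match pvInnerA p cs with
      | some r => some r
      | none => pvOuterA cs ps

def pick_symbol (candidates : List (List (String × String))) (prefs : Option (List String)) : Option String :=
  if candidates = [] then none
  else
    let early : Option String :=
      match prefs with
      | some ps => if ps = [] then none else pvOuterA candidates ps
      | none => none
    match early with
    | some r => some r
    | none =>
        match candidates with
        | c :: _ =>
            match pvCodeA c, pvExchA c with
            | some cd, some ex =>
                if cd ≠ "" ∧ ex ≠ "" then some (pvFmtA cd ex) else none
            | _, _ => none
        | [] => none

-- ===== PORT B =====
-- truthiness filter: a Python string is truthy iff nonempty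
def pvT (o : Option String) : Option String :=
  o.bind (fun s => if s = "" then none else some s)

-- the (code, exch) pair of a candidate, present only when both are truthy
def pvFieldsB (c : List (String × String)) : Option (String × String) :=
  ((pvT (c.lookup "code")).orElse (fun _ => pvT (c.lookup "symbol"))).bind fun cd =>
    ((pvT (c.lookup "exchangeShortName")).orElse (fun _ => pvT (c.lookup "exchange"))).map fun ex =>
      (cd, ex)

def pvDotB (code exch : String) : String :=
  String.ofList (code.toList ++ '.' :: exch.toList)

-- loop body: keep the candidate of strictly smaller rank (so the earliest candidate wins ties)
def pvStep (ups : List String) (best : Option (Nat × String × String))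
    (c : List (String × String)) : Option (Nat × String × String) :=
  match pvFieldsB c with
  | some (cd, ex) =>
      match PySem.List.index? ups (PySem.Str.upper ex) with
      | some r =>
          match best with
          | none => some (r, cd, ex)
          | some b => if r < b.1 then some (r, cd, ex) else some b
      | none => best
  | none => best

def pick_symbol_alt (candidates : List (List (String × String))) (prefs : Option (List String)) : Option String :=
  match candidates.head? with
  | none => none
  | some c0 =>
      let viaPrefs : Option String :=
        match prefs with
        | none => none
        | some ps =>
            if ps.isEmpty then none
            else (candidates.foldl (pvStep (ps.map PySem.Str.upper)) none).map
                   (fun b => pvDotB b.2.1 b.2.2)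
      viaPrefs.orElse (fun _ => (pvFieldsB c0).map (fun pr => pvDotB pr.1 pr.2))

-- ===== PRECONDITION & SPEC =====
def Spec_pick_symbol (candidates : List (List (String × String))) (prefs : Option (List String)) (out : Option String) : Prop := out = pick_symbol_alt candidates prefs
instance (candidates : List (List (String × String))) (prefs : Option (List String)) (out : Option String) : Decidable (Spec_pick_symbol candidates prefs out) := by unfold Spec_pick_symbol; infer_instance

-- ===== CLAIM =====
def Claim_equal_pick_symbol : Prop := ∀ (candidates : List (List (String × String))) (prefs : Option (List String)), Dom_pick_symbol candidates prefs → Spec_pick_symbol candidates prefs (pick_symbol candidates prefs)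

-- ===== LEMMAS AND PROOFS =====

-- bridge: B's field extraction in terms of A's
theorem pvFieldsB_eq (c : List (String × String)) :
    pvFieldsB c =
      match pvCodeA c, pvExchA c with
      | some cd, some ex => if cd ≠ "" ∧ ex ≠ "" then some (cd, ex) else none
      | _, _ => none := by
  have hT : ∀ a b : Option String,
      (pvT a).orElse (fun _ => pvT b) = (pvOrA a b).bind (fun s => if s = "" then none else some s) := by
    intro a b
    cases a with
    | none => simp [pvT, pvOrA, Option.orElse]
    | some s =>
        by_cases hs : s = "" <;> simp [pvT, pvOrA, Option.orElse, hs]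
  unfold pvFieldsB pvCodeA pvExchA
  rw [hT, hT]
  cases hc : pvOrA (c.lookup "code") (c.lookup "symbol") with
  | none => simp
  | some cd =>
      cases he : pvOrA (c.lookup "exchangeShortName") (c.lookup "exchange") with
      | none => by_cases h1 : cd = "" <;> simp [h1]
      | some ex =>
          by_cases h1 : cd = "" <;> by_cases h2 : ex = "" <;> simp [h1, h2]

-- first candidate whose fields are valid and whose upper-cased exchange is u
def pvFirstB (u : String) : List (List (String × String)) → Option (String × String)
  | [] => none
  | c :: rest =>
      match pvFieldsB c with
      | some pr => if PySem.Str.upper pr.2 = u then some pr else pvFirstB u rest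
      | none => pvFirstB u rest

-- the minimum-rank candidate of a list (earliest wins ties), as a pure recursion
def pvBestOf (ups : List String) : List (List (String × String)) → Option (Nat × String × String)
  | [] => none
  | c :: cs =>
      match pvFieldsB c with
      | some (cd, ex) =>
          match PySem.List.index? ups (PySem.Str.upper ex) with
          | some r =>
              match pvBestOf ups cs with
              | none => some (r, cd, ex)
              | some b => if r ≤ b.1 then some (r, cd, ex) else some b
          | none => pvBestOf ups cs
      | none => pvBestOf ups cs

-- merge of an earlier accumulator with the best of the remaining list
def pvMerge (a b : Option (Nat × String × String)) : Option (Nat × String × String) :=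
  match a, b with
  | none, b => b
  | some a', none => some a'
  | some a', some b' => if b'.1 < a'.1 then some b' else some a'

-- B's fold equals the pure recursion
theorem foldl_pvStep_eq (ups : List String) (cs : List (List (String × String)))
    (acc : Option (Nat × String × String)) :
    cs.foldl (pvStep ups) acc = pvMerge acc (pvBestOf ups cs) := by
  induction cs generalizing acc with
  | nil => cases acc <;> simp [pvMerge, pvBestOf]
  | cons c cs ih =>
      simp only [List.foldl_cons, ih]
      cases hf : pvFieldsB c with
      | none => simp only [pvStep, pvBestOf, hf]
      | some pr =>
          obtain ⟨cd, ex⟩ := pr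
          simp only [pvStep, pvBestOf, hf]
          cases hi : PySem.List.index? ups (PySem.Str.upper ex) with
          | none => rfl
          | some r =>
              cases acc with
              | none =>
                  cases hb : pvBestOf ups cs with
                  | none => simp [pvMerge]
                  | some b' =>
                      by_cases h : r ≤ b'.1
                      · simp [pvMerge, h, Nat.not_lt.mpr h]
                      · simp [pvMerge, h, Nat.lt_of_not_le h]
              | some a' =>
                  cases hb : pvBestOf ups cs with
                  | none =>
                      by_cases h : r < a'.1 <;> simp [pvMerge, h]
                  | some b' =>
                      by_cases h1 : r < a'.1 <;> by_cases h2 : r ≤ b'.1 <;>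
                        by_cases h3 : b'.1 < a'.1 <;>
                          simp [pvMerge, h1, h2, h3] <;> omega

-- pvBestOf over the empty preference list is empty
theorem pvBestOf_nil (cs : List (List (String × String))) : pvBestOf [] cs = none := by
  induction cs with
  | nil => rfl
  | cons c cs ih =>
      cases hf : pvFieldsB c with
      | none => simp [pvBestOf, hf, ih]
      | some pr =>
          obtain ⟨cd, ex⟩ := pr
          simp [pvBestOf, hf, PySem.List.index?_eq_idxOf?, ih]

-- peeling one preference off pvBestOf
theorem pvBestOf_cons (u : String) (ups : List String) (cs : List (List (String × String))) :
    pvBestOf (u :: ups) cs =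
      match pvFirstB u cs with
      | some pr => some (0, pr)
      | none => (pvBestOf ups cs).map (fun b => (b.1 + 1, b.2)) := by
  induction cs with
  | nil => rfl
  | cons c cs ih =>
      cases hf : pvFieldsB c with
      | none => simp only [pvBestOf, pvFirstB, hf]; exact ih
      | some pr =>
          obtain ⟨cd, ex⟩ := pr
          simp only [pvBestOf, pvFirstB, hf]
          by_cases hu : PySem.Str.upper ex = u
          · rw [hu, PySem.List.index?_cons_self, ih, if_pos rfl]
            cases hfb : pvFirstB u cs with
            | some q => simp
            | none =>
                cases hb : pvBestOf ups cs with
                | none => simp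
                | some b => simp
          · rw [PySem.List.index?_cons_of_ne ups (fun h => hu h.symm), ih, if_neg hu]
            cases hr : PySem.List.index? ups (PySem.Str.upper ex) with
            | none => rfl
            | some r =>
                simp only [Option.map_some]
                cases hfb : pvFirstB u cs with
                | some q => simp
                | none =>
                    cases hb : pvBestOf ups cs with
                    | none => simp
                    | some b =>
                        by_cases h : r ≤ b.1
                        · simp [h, Nat.succ_le_succ h]
                        · simp [h]

-- A's inner scan is the first matching candidate
theorem pvInnerA_eq (p : String) (cs : List (List (String × String))) :
    pvInnerA p cs = (pvFirstB (PySem.Str.upper p) cs).map (fun pr => pvFmtA pr.1 pr.2) := by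
  induction cs with
  | nil => rfl
  | cons c rest ih =>
      rw [show pvFirstB (PySem.Str.upper p) (c :: rest)
            = match pvFieldsB c with
              | some pr => if PySem.Str.upper pr.2 = PySem.Str.upper p then some pr
                           else pvFirstB (PySem.Str.upper p) rest
              | none => pvFirstB (PySem.Str.upper p) rest from rfl]
      rw [pvFieldsB_eq]
      cases hc : pvCodeA c with
      | none => simp [pvInnerA, hc, ih]
      | some cd =>
          cases he : pvExchA c with
          | none => simp [pvInnerA, hc, he, ih]
          | some ex =>
              by_cases ht : cd ≠ "" ∧ ex ≠ ""
              · by_cases hu : PySem.Str.upper ex = PySem.Str.upper p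
                · simp [pvInnerA, hc, he, ht.1, ht.2, hu]
                · simp [pvInnerA, hc, he, ht, hu, ih]
              · have hcond : ¬ (cd ≠ "" ∧ ex ≠ "" ∧ PySem.Str.upper ex = PySem.Str.upper p) :=
                  fun h => ht ⟨h.1, h.2.1⟩
                simp [pvInnerA, hc, he, hcond, ht, ih]

-- A's nested loops equal the formatted minimum-rank candidate
theorem pvOuterA_eq (cs : List (List (String × String))) (ps : List String) :
    pvOuterA cs ps = (pvBestOf (ps.map PySem.Str.upper) cs).map (fun b => pvFmtA b.2.1 b.2.2) := by
  induction ps with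
  | nil => simp [pvOuterA, pvBestOf_nil]
  | cons p ps ih =>
      simp only [pvOuterA, List.map_cons, pvBestOf_cons, pvInnerA_eq]
      cases hfb : pvFirstB (PySem.Str.upper p) cs with
      | some pr => simp
      | none =>
          simp only [Option.map_none]
          rw [ih]
          cases pvBestOf (ps.map PySem.Str.upper) cs <;> simp

-- A's fallback on candidates[0] equals B's fallback
theorem pvFallback_eq (c : List (String × String)) :
    (match pvCodeA c, pvExchA c with
     | some cd, some ex => if cd ≠ "" ∧ ex ≠ "" then some (pvFmtA cd ex) else none
     | _, _ => none)
    = (pvFieldsB c).map (fun pr => pvDotB pr.1 pr.2) := by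
  rw [pvFieldsB_eq]
  cases hc : pvCodeA c with
  | none => simp
  | some cd =>
      cases he : pvExchA c with
      | none => simp
      | some ex =>
          by_cases ht : cd ≠ "" ∧ ex ≠ ""
          · simp [ht, pvFmtA, pvDotB]
          · simp [ht]

-- ===== VERDICT =====
theorem pick_symbol_spec : Claim_equal_pick_symbol := by
  intro candidates prefs _
  unfold Spec_pick_symbol pick_symbol pick_symbol_alt
  cases candidates with
  | nil => simp
  | cons c rest =>
      simp only [List.head?_cons, if_neg (List.cons_ne_nil c rest)]
      cases prefs with
      | none => simpa [Option.orElse] using pvFallback_eq c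
      | some ps =>
          by_cases hps : ps = []
          · simpa [hps, Option.orElse] using pvFallback_eq c
          · simp only [hps, if_neg, not_false_iff, List.isEmpty_iff]
            rw [pvOuterA_eq, foldl_pvStep_eq]
            rw [show pvMerge none (pvBestOf (ps.map PySem.Str.upper) (c :: rest))
                  = pvBestOf (ps.map PySem.Str.upper) (c :: rest) from by
              cases pvBestOf (ps.map PySem.Str.upper) (c :: rest) <;> rfl]
            cases hb : pvBestOf (ps.map PySem.Str.upper) (c :: rest) with
            | some b => simp [Option.orElse, pvFmtA, pvDotB]
            | none => simpa [Option.orElse] using pvFallback_eq c
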